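-- pv_equiv track=rewrite | github.com/johnsbuck/Wordle_Solver | main.py | get_word_key_dict
-- ===== SOURCE A (Python) =====
-- def get_word_key_dict(words):
--     word_key_dict = {}
--     for x in words:
--         key = tuple(sorted(x))
--         if key not in word_key_dict:
--             word_key_dict[key] = [1, 0, 0, 0, 0, 0]
--         else:
--             word_key_dict[key][0] += 1
--     return word_key_dict
-- ===== SOURCE B (Python) =====
-- def get_word_key_dict(words):
--     # Peel anagram groups off the front of the key list: take the first
--     # remaining key, count every occurrence of it at once, drop them all,
--     # and repeat on what is left.  No per-word dict probe/mutation; rows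
--     # are emitted one whole group at a time in first-occurrence order.
--     remaining = [tuple(sorted(w)) for w in words]
--     items = []
--     while remaining:
--         k = remaining[0]
--         items.append((k, [remaining.count(k), 0, 0, 0, 0, 0]))
--         remaining = [x for x in remaining if x != k]
--     return dict(items)  # keys are pairwise distinct, so this just re-wraps items
-- ===== Notes on version B (the rewrite author's own statement) =====
-- stated objective: alternative
-- what changed: B keeps no counting dict at all: it repeatedly peels one whole anagram group off the front of the key list (count the first key's occurrences with list.count, then filter them all out), emitting each result row in one step, instead of A's single pass that probes a hash map per word and conditionally inserts or bumps a cell in place.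
import Mathlib
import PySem

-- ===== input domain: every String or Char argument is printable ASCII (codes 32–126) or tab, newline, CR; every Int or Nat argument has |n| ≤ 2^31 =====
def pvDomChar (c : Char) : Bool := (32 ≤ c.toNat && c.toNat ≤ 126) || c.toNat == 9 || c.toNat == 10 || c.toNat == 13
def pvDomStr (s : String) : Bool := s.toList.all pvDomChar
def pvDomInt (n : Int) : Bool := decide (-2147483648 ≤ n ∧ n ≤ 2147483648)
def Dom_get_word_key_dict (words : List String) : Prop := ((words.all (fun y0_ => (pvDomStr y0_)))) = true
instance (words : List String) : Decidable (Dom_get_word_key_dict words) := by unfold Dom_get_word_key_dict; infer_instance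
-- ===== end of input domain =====

-- B keeps no counting dict: it repeatedly peels one whole anagram group off the
-- front of the key list (count the first key's occurrences, filter them out),
-- emitting result rows group by group, instead of A's per-word hash-map pass.


-- ===== PORT A =====
-- key = tuple(sorted(x)) : the word's characters as 1-char strings, sorted (same expression in both Pythons)
def pvKey (x : String) : List String :=
  PySem.List.sorted (x.toList.map (fun c => String.ofList [c])) (fun s => s) false

def get_word_key_dict (words : List String) : List (List String × List Int) :=
  (words.foldl (fun d x =>
      let key := pvKey x
      if ¬ d.contains key then
        d.insert key ([1, 0, 0, 0, 0, 0] : List Int)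
      else
        -- word_key_dict[key][0] += 1 : in-place bump of cell 0 of the stored list
        d.insert key (PySem.List.pySetD (d.getD key []) 0 (PySem.List.pyGetD (d.getD key []) 0 0 + 1)))
    PySem.Dict.empty).items

-- ===== PORT B =====
-- the while loop of Source B: peel the first key's whole group, append its row, recurse on the rest
def pvPeel : List (List String) → List (List String × List Int) → List (List String × List Int)
  | [], items => items
  | k :: rest, items =>
      pvPeel ((k :: rest).filter (fun x => !(x == k)))
        (items ++ [(k, ([((PySem.List.count (k :: rest) k : Nat) : Int), 0, 0, 0, 0, 0] : List Int))])
  termination_by ks _ => ks.length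
  decreasing_by
    simp only [List.filter_cons, beq_self_eq_true, Bool.not_true, if_false, List.length_cons,
      Bool.false_eq_true]
    have := List.length_filter_le (fun x => !(x == k)) rest
    omega

-- dict(items): the peeled keys are pairwise distinct, so dict(items) is items itself
def get_word_key_dict_alt (words : List String) : List (List String × List Int) :=
  pvPeel (words.map pvKey) []

-- ===== PRECONDITION & SPEC =====
def Spec_get_word_key_dict (words : List String) (out : List (List String × List Int)) : Prop := out = get_word_key_dict_alt words
instance (words : List String) (out : List (List String × List Int)) : Decidable (Spec_get_word_key_dict words out) := by unfold Spec_get_word_key_dict; infer_instance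

-- ===== CLAIM (what is proved, stated in full; the proofs are below) =====
def Claim_equal_get_word_key_dict : Prop := ∀ (words : List String), Dom_get_word_key_dict words → Spec_get_word_key_dict words (get_word_key_dict words)

-- ===== LEMMAS AND PROOFS =====

-- pad a count into A's 6-element row
def pvPad (p : List String × Int) : List String × List Int := (p.1, ([p.2, 0, 0, 0, 0, 0] : List Int))

-- loop invariant: A's dict is the plain counter dict with every count padded to a row
theorem pv_invariant (ws : List String)
    (dA : PySem.Dict (List String) (List Int)) (dB : PySem.Dict (List String) Int)
    (hnd : dB.keys.Nodup) (h : dA.items = dB.items.map pvPad) :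
    (ws.foldl (fun d x =>
      let key := pvKey x
      if ¬ d.contains key then
        d.insert key ([1, 0, 0, 0, 0, 0] : List Int)
      else
        d.insert key (PySem.List.pySetD (d.getD key []) 0 (PySem.List.pyGetD (d.getD key []) 0 0 + 1))) dA).items
    = ((ws.foldl (fun d w => d.insert (pvKey w) (d.getD (pvKey w) 0 + 1)) dB).items).map pvPad := by
  induction ws generalizing dA dB with
  | nil => simpa using h
  | cons w rest ih =>
    simp only [List.foldl_cons]
    have hkeys : dA.keys = dB.keys := by
      simp only [PySem.Dict.keys, h, List.map_map]
      rfl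
    have hcont : dA.contains (pvKey w) = dB.contains (pvKey w) := by
      by_cases hk : pvKey w ∈ dB.keys
      · rw [PySem.Dict.contains_eq_decide_mem_keys, PySem.Dict.contains_eq_decide_mem_keys,
          hkeys]
      · rw [PySem.Dict.contains_eq_decide_mem_keys, PySem.Dict.contains_eq_decide_mem_keys,
          hkeys]
    by_cases hc : dB.contains (pvKey w) = true
    · -- key already present: both overwrite in place
      have hcA : dA.contains (pvKey w) = true := by rw [hcont]; exact hc
      obtain ⟨c, hvc⟩ : ∃ c, dB.get? (pvKey w) = some c := by
        cases hg : dB.get? (pvKey w) with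
        | none =>
          exfalso
          have := (PySem.Dict.get?_eq_none_iff_contains (d := dB) (k := pvKey w)).1 hg
          simp [this] at hc
        | some c => exact ⟨c, rfl⟩
      have hmemB : (pvKey w, c) ∈ dB.items := PySem.Dict.mem_items_of_get?_eq_some _ hvc
      have hgB : dB.getD (pvKey w) 0 = c := PySem.Dict.getD_of_get?_eq_some dB 0 hvc
      have hmemA : (pvKey w, ([c, 0, 0, 0, 0, 0] : List Int)) ∈ dA.items := by
        rw [h]
        exact List.mem_map.2 ⟨(pvKey w, c), hmemB, rfl⟩
      have hndA : dA.keys.Nodup := by rw [hkeys]; exact hnd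
      have hgA : dA.getD (pvKey w) [] = ([c, 0, 0, 0, 0, 0] : List Int) :=
        PySem.Dict.getD_of_mem_items _ hmemA hndA []
      rw [if_neg (by simp [hcA])]
      apply ih
      · rw [PySem.Dict.keys_insert_of_contains _ _ hc]; exact hnd
      · rw [PySem.Dict.items_insert_of_contains _ _ hcA,
          PySem.Dict.items_insert_of_contains _ _ hc, h, List.map_map, List.map_map]
        apply List.map_congr_left
        intro p hp
        by_cases hpk : p.1 = pvKey w
        · simp [Function.comp, pvPad, hpk, hgA, hgB,
            PySem.List.pySetD, PySem.List.pySet?, PySem.List.pyIdx?]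
        · simp [Function.comp, pvPad, hpk]
    · -- fresh key: both append
      rw [Bool.not_eq_true] at hc
      have hcA : dA.contains (pvKey w) = false := by rw [hcont]; simpa using hc
      have hgB : dB.getD (pvKey w) 0 = 0 := PySem.Dict.getD_of_not_contains dB 0 hc
      rw [if_pos (by simp [hcA])]
      apply ih
      · rw [PySem.Dict.keys_insert_of_not_contains _ _ hc]
        refine List.Nodup.append hnd (List.nodup_singleton _) ?_
        intro k hk1 hk2
        simp at hk2
        subst hk2
        rw [← PySem.Dict.contains_iff_mem_keys] at hk1
        simp [hk1] at hc
      · rw [PySem.Dict.items_insert_of_not_contains _ _ hcA,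
          PySem.Dict.items_insert_of_not_contains _ _ hc, h, List.map_append, hgB]
        rfl

-- pvPeel with its accumulator expressed as an append
theorem pvPeel_acc (ks : List (List String)) (acc : List (List String × List Int)) :
    pvPeel ks acc = acc ++ pvPeel ks [] := by
  induction hn : ks.length using Nat.strong_induction_on generalizing ks acc with
  | _ n ih =>
    cases ks with
    | nil => simp [pvPeel]
    | cons k rest =>
      simp only [pvPeel]
      have hlt : ((k :: rest).filter (fun x => !(x == k))).length < n := by
        subst hn
        simp only [List.filter_cons, beq_self_eq_true, Bool.not_true, if_false, List.length_cons,
          Bool.false_eq_true]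
        have := List.length_filter_le (fun x => !(x == k)) rest
        omega
      conv_lhs => rw [ih _ hlt _ _ rfl]
      conv_rhs => rw [ih _ hlt _ _ rfl]
      simp

-- set(filter) = filter(set)
theorem ofList_filter (p : List String → Bool) (r : List (List String)) :
    PySem.Set.ofList (r.filter p) = (PySem.Set.ofList r).filter p := by
  induction r with
  | nil => simp [PySem.Set.ofList_nil]
  | cons x r ih =>
    by_cases hx : p x = true
    · rw [List.filter_cons_of_pos hx, PySem.Set.ofList_cons, PySem.Set.ofList_cons,
        List.filter_cons_of_pos hx, ih]
      congr 1
      simp only [PySem.Set.discard]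
      rw [List.filter_comm]
    · rw [List.filter_cons_of_neg hx, PySem.Set.ofList_cons, List.filter_cons_of_neg hx, ih]
      simp only [PySem.Set.discard]
      rw [List.filter_filter]
      apply List.filter_congr
      intro y _
      by_cases hyx : y = x
      · simp [hyx, hx]
      · simp [hyx]

-- the peeling loop computes the counter rendered in first-occurrence order
theorem pvPeel_eq_map (ks : List (List String)) :
    pvPeel ks [] =
      (PySem.Set.ofList ks).map
        (fun k => (k, ([((ks.count k : Nat) : Int), 0, 0, 0, 0, 0] : List Int))) := by
  induction hn : ks.length using Nat.strong_induction_on generalizing ks with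
  | _ n ih =>
    cases ks with
    | nil => simp [pvPeel, PySem.Set.ofList_nil]
    | cons k rest =>
      rw [show pvPeel (k :: rest) [] = pvPeel ((k :: rest).filter (fun x => !(x == k)))
            ([] ++ [(k, ([((PySem.List.count (k :: rest) k : Nat) : Int), 0, 0, 0, 0, 0] :
              List Int))]) from by simp only [pvPeel],
          pvPeel_acc]
      have hfe : (k :: rest).filter (fun x => !(x == k)) = rest.filter (fun x => !(x == k)) := by
        simp
      have hlt : ((k :: rest).filter (fun x => !(x == k))).length < n := by
        subst hn
        rw [hfe]
        have := List.length_filter_le (fun x => !(x == k)) rest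
        simp only [List.length_cons]
        omega
      rw [ih _ hlt _ rfl]
      rw [PySem.Set.ofList_cons, List.map_cons]
      simp only [List.nil_append, PySem.List.count_eq, hfe]
      have hset : (PySem.Set.ofList rest).filter (fun x => !(x == k))
          = PySem.Set.discard (PySem.Set.ofList rest) k := by
        simp [PySem.Set.discard]
      rw [ofList_filter, hset, List.singleton_append]
      congr 1
      apply List.map_congr_left
      intro v hv
      have hvk : v ≠ k := ((PySem.Set.mem_discard _ _ _).1 hv).2
      have hcnt : (rest.filter (fun x => !(x == k))).count v = rest.count v := by
        rw [List.count_filter]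
        simp [hvk]
      rw [hcnt]
      simp only [List.count_cons]
      simp [Ne.symm hvk]

theorem get_word_key_dict_spec : Claim_equal_get_word_key_dict := by
  intro words _
  unfold Spec_get_word_key_dict get_word_key_dict get_word_key_dict_alt
  have h := pv_invariant words PySem.Dict.empty PySem.Dict.empty
    (by simp [PySem.Dict.keys_empty]) rfl
  rw [h]
  rw [← List.foldl_map (f := pvKey)
      (g := fun d k => PySem.Dict.insert d k (PySem.Dict.getD d k 0 + 1))]
  rw [PySem.Dict.foldl_insert_getD_add_one_eq_counter, PySem.Dict.items_counter]
  rw [pvPeel_eq_map, List.map_map]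
  rfl
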